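-- pv_equiv track=rewrite | github.com/nedzof/ElectrumSVP | electrumsv/benford.py | _smallest_amount_with_digit
-- ===== SOURCE A (Python) =====
-- def _smallest_amount_with_digit(digit: int, minimum_value: int) -> int:
--     if minimum_value <= digit:
--         return digit
--     exp = max(0, len(str(minimum_value)) - 1)
--     while True:
--         lower = digit * (10 ** exp)
--         upper = ((digit + 1) * (10 ** exp)) - 1 if digit < 9 else (10 ** (exp + 1)) - 1
--         if upper >= minimum_value:
--             return max(lower, minimum_value)
--         exp += 1
-- ===== SOURCE B (Python) =====
-- def _smallest_amount_with_digit(digit: int, minimum_value: int) -> int: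
--     if minimum_value <= digit:
--         return digit
--     if digit == 0:
--         return minimum_value
--     p = 10 ** (len(str(minimum_value)) - 1)
--     lead = minimum_value // p
--     if lead < digit:
--         return digit * p
--     if lead == digit:
--         return minimum_value
--     return digit * p * 10
-- ===== Notes on version B (the rewrite author's own statement) =====
-- stated objective: simpler
-- what changed: Replaces A's unbounded widening loop over magnitudes with a loop-free closed form: compute the leading digit of minimum_value once and branch on how it compares with the target digit (plus a direct digit==0 case).
import Mathlib
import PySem

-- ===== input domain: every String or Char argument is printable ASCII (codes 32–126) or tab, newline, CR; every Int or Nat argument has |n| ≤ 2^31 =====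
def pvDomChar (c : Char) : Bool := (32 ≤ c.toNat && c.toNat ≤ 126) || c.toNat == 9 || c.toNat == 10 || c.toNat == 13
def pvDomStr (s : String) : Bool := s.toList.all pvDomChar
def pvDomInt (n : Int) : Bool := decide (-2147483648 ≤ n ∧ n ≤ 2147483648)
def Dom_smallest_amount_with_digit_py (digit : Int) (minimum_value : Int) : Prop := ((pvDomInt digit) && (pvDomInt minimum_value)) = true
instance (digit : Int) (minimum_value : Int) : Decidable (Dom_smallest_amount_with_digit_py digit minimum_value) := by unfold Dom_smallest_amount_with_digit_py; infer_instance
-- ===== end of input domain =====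

-- B replaces A's widening magnitude loop with a loop-free comparison of the leading digit
-- of minimum_value against the target digit (objective: simpler).

-- ===== PORT A =====
-- A's 'while True' loop; the fuel argument only makes it total (never exhausted on Pre_ inputs,
-- where the loop exits after at most two iterations); 0 on exhaustion is unreachable.
def pvALoop (digit : Int) (minimum_value : Int) : Nat → Nat → Int
  | 0, _ => 0
  | fuel + 1, exp =>
    let lower := digit * 10 ^ exp
    let upper := if digit < 9 then (digit + 1) * 10 ^ exp - 1 else 10 ^ (exp + 1) - 1
    if minimum_value ≤ upper then max lower minimum_value
    else pvALoop digit minimum_value fuel (exp + 1)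

def smallest_amount_with_digit_py (digit : Int) (minimum_value : Int) : Int :=
  if minimum_value ≤ digit then digit
  else
    -- Nat subtraction truncates at 0, exactly Python's max(0, len(str(m)) - 1)
    pvALoop digit minimum_value (minimum_value.toNat + 2)
      ((PySem.Int.toChars minimum_value).length - 1)

-- ===== PORT B =====
def smallest_amount_with_digit_py_alt (digit : Int) (minimum_value : Int) : Int :=
  if minimum_value ≤ digit then digit
  else if digit = 0 then minimum_value
  else
    let p : Int := 10 ^ ((PySem.Int.toChars minimum_value).length - 1)
    let lead := PySem.Int.floordiv minimum_value p
    if lead < digit then digit * p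
    else if lead = digit then minimum_value
    else digit * p * 10

-- ===== PRECONDITION & SPEC =====
-- Pre_ excludes exactly the inputs where A never returns: for digit < 0 < minimum_value - digit
-- the band's upper bound stays below minimum_value forever and A's 'while True' loop diverges.
def Pre_smallest_amount_with_digit_py (digit : Int) (minimum_value : Int) : Prop :=
  0 ≤ digit ∨ minimum_value ≤ digit
instance (digit : Int) (minimum_value : Int) : Decidable (Pre_smallest_amount_with_digit_py digit minimum_value) := by unfold Pre_smallest_amount_with_digit_py; infer_instance

def pvWitness_smallest_amount_with_digit_py : Int × Int := (3, 47)

def Spec_smallest_amount_with_digit_py (digit : Int) (minimum_value : Int) (out : Int) : Prop := out = smallest_amount_with_digit_py_alt digit minimum_value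
instance (digit : Int) (minimum_value : Int) (out : Int) : Decidable (Spec_smallest_amount_with_digit_py digit minimum_value out) := by unfold Spec_smallest_amount_with_digit_py; infer_instance

-- ===== CLAIM (what is proved, stated in full; the proofs are below) =====
def Claim_equal_smallest_amount_with_digit_py : Prop := ∀ (digit : Int) (minimum_value : Int), Dom_smallest_amount_with_digit_py digit minimum_value → Pre_smallest_amount_with_digit_py digit minimum_value → Spec_smallest_amount_with_digit_py digit minimum_value (smallest_amount_with_digit_py digit minimum_value)

-- ===== LEMMAS AND PROOFS =====

-- Lower bound companion to Mathlib's Nat.toDigitsCore_length: with enough fuel, the digit string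
-- of n is long enough that n < b ^ (its length).
lemma pv_toDigitsCore_lower (b : Nat) (hb : 2 ≤ b) :
    ∀ (n f : Nat) (l : List Char), n + 1 ≤ f →
      n < b ^ ((Nat.toDigitsCore b f n l).length - l.length) ∧
      l.length < (Nat.toDigitsCore b f n l).length := by
  intro n
  induction n using Nat.strong_induction_on with
  | _ n ih =>
    intro f l hf
    match f, hf with
    | f + 1, _ =>
      simp only [Nat.toDigitsCore]
      by_cases h0 : n / b = 0
      · rw [if_pos h0]
        have hnb : n < b := by
          rcases Nat.lt_or_ge n b with h | h
          · exact h
          · exact absurd h0 (by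
              have : 1 ≤ n / b := (Nat.one_le_div_iff (by omega)).mpr h
              omega)
        constructor
        · simpa using hnb
        · simp
      · rw [if_neg h0]
        have hnpos : b ≤ n := by
          by_contra hlt
          exact h0 (Nat.div_eq_of_lt (by omega))
        have hdlt : n / b < n := Nat.div_lt_self (by omega) (by omega)
        have hfuel : n / b + 1 ≤ f := by omega
        obtain ⟨h1, h2⟩ := ih (n / b) hdlt f (Nat.digitChar (n % b) :: l) hfuel
        set L := (Nat.toDigitsCore b f (n / b) (Nat.digitChar (n % b) :: l)).length with hL
        refine ⟨?_, by simp at h2 ⊢; omega⟩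
        have hlen : (Nat.digitChar (n % b) :: l).length = l.length + 1 := by simp
        have hdiff : L - l.length = (L - (l.length + 1)) + 1 := by
          simp [hlen] at h2; omega
        rw [hdiff, pow_succ]
        have hmod : n % b < b := Nat.mod_lt _ (by omega)
        calc n = b * (n / b) + n % b := (Nat.div_add_mod n b).symm
          _ < b * (n / b) + b := by omega
          _ = (n / b + 1) * b := by ring
          _ ≤ b ^ (L - (l.length + 1)) * b := by
              have : n / b + 1 ≤ b ^ (L - (l.length + 1)) := by
                simpa [hlen] using h1
              exact Nat.mul_le_mul_right b this

-- Decimal bracket for Nat.toDigits: 10^(len-1) ≤ m < 10^len for positive m.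
lemma pv_toDigits_bracket (m : Nat) (hm : 1 ≤ m) :
    10 ^ ((Nat.toDigits 10 m).length - 1) ≤ m ∧ m < 10 ^ (Nat.toDigits 10 m).length := by
  constructor
  · have hlen : (Nat.toDigits 10 m).length ≤ Nat.log 10 m + 1 :=
      Nat.toDigits_length 10 m (Nat.log 10 m + 1) (by omega)
        (Nat.lt_pow_succ_log_self (by omega) m)
    calc 10 ^ ((Nat.toDigits 10 m).length - 1)
        ≤ 10 ^ Nat.log 10 m := Nat.pow_le_pow_right (by omega) (by omega)
      _ ≤ m := Nat.pow_log_le_self 10 (by omega)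
  · have := pv_toDigitsCore_lower 10 (by omega) m (m + 1) [] (le_refl _)
    simpa [Nat.toDigits] using this.1

-- The bracket transported to Int and to PySem.Int.toChars.
lemma pv_toChars_bracket (m : Int) (hm : 1 ≤ m) :
    (10 : Int) ^ ((PySem.Int.toChars m).length - 1) ≤ m ∧
    m < 10 ^ (PySem.Int.toChars m).length ∧ 1 ≤ (PySem.Int.toChars m).length := by
  have hneg : ¬ m < 0 := by omega
  have hchars : PySem.Int.toChars m = Nat.toDigits 10 m.toNat := by
    simp [PySem.Int.toChars, hneg]
  have hnat : 1 ≤ m.toNat := by omega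
  obtain ⟨h1, h2⟩ := pv_toDigits_bracket m.toNat hnat
  have hlenpos : 1 ≤ (Nat.toDigits 10 m.toNat).length := by
    by_contra h
    have h0 : (Nat.toDigits 10 m.toNat).length = 0 := by omega
    rw [h0] at h2; omega
  have hmeq : ((m.toNat : Int)) = m := Int.toNat_of_nonneg (by omega)
  refine ⟨?_, ?_, by rw [hchars]; exact hlenpos⟩
  · rw [hchars, ← hmeq]
    exact_mod_cast h1
  · rw [hchars, ← hmeq]
    exact_mod_cast h2

-- One step of A's loop, split by the digit < 9 test.
lemma pvALoop_step_lt9 (digit minimum_value : Int) (f exp : Nat) (h9 : digit < 9) :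
    pvALoop digit minimum_value (f + 1) exp =
      if minimum_value ≤ (digit + 1) * 10 ^ exp - 1 then max (digit * 10 ^ exp) minimum_value
      else pvALoop digit minimum_value f (exp + 1) := by
  simp [pvALoop, h9]

lemma pvALoop_step_ge9 (digit minimum_value : Int) (f exp : Nat) (h9 : ¬ digit < 9) :
    pvALoop digit minimum_value (f + 1) exp =
      if minimum_value ≤ 10 ^ (exp + 1) - 1 then max (digit * 10 ^ exp) minimum_value
      else pvALoop digit minimum_value f (exp + 1) := by
  simp [pvALoop, h9]

-- ===== VERDICT (by name: the statement is the Claim_ definition above) =====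
theorem smallest_amount_with_digit_py_spec : Claim_equal_smallest_amount_with_digit_py := by
  intro digit minimum_value _hdom hpre
  unfold Spec_smallest_amount_with_digit_py
  unfold smallest_amount_with_digit_py smallest_amount_with_digit_py_alt
  by_cases hguard : minimum_value ≤ digit
  · simp [hguard]
  · simp only [if_neg hguard]
    have hd0 : 0 ≤ digit := by
      rcases hpre with h | h
      · exact h
      · exact absurd h hguard
    have hm1 : 1 ≤ minimum_value := by omega
    obtain ⟨hlow, hhigh, hL1⟩ := pv_toChars_bracket minimum_value hm1
    have hp : (0:Int) < 10 ^ ((PySem.Int.toChars minimum_value).length - 1) := by positivity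
    have hlead_lt : ∀ q : Int,
        PySem.Int.floordiv minimum_value (10 ^ ((PySem.Int.toChars minimum_value).length - 1)) < q ↔
        minimum_value < q * 10 ^ ((PySem.Int.toChars minimum_value).length - 1) :=
      fun q => PySem.Int.floordiv_lt_iff_lt_mul hp
    have hlead_le : ∀ q : Int,
        q ≤ PySem.Int.floordiv minimum_value (10 ^ ((PySem.Int.toChars minimum_value).length - 1)) ↔
        q * 10 ^ ((PySem.Int.toChars minimum_value).length - 1) ≤ minimum_value :=
      fun q => PySem.Int.le_floordiv_iff_mul_le hp
    set L := (PySem.Int.toChars minimum_value).length with hLdef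
    set p : Int := 10 ^ (L - 1) with hpdef
    have hLsplit : L - 1 + 1 = L := by omega
    have hpow2 : (10:Int) ^ (L - 1 + 1) = 10 * p := by rw [pow_succ]; ring
    have h10p : minimum_value < 10 * p := by
      have h : (10:Int) ^ L = 10 * p := by
        rw [hpdef, ← pow_succ', hLsplit]
      omega
    set lead := PySem.Int.floordiv minimum_value p with hleaddef
    have hlead9 : lead < 10 := by rw [hlead_lt]; omega
    have hlead1 : 1 ≤ lead := by rw [hlead_le]; omega
    -- A's fuel is ≥ 2; two unfoldings suffice
    obtain ⟨k, hk⟩ : ∃ k, minimum_value.toNat + 2 = k + 1 + 1 := ⟨minimum_value.toNat, rfl⟩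
    rw [hk]
    by_cases h9 : digit < 9
    · rw [pvALoop_step_lt9 digit minimum_value (k + 1) (L - 1) h9]
      by_cases hc1 : minimum_value ≤ (digit + 1) * 10 ^ (L - 1) - 1
      · -- first iteration returns; here lead ≤ digit
        rw [if_pos hc1]
        have hc1' : minimum_value < (digit + 1) * p := by rw [hpdef]; omega
        have hleadle : lead ≤ digit := by
          have : lead < digit + 1 := by rw [hlead_lt]; omega
          omega
        have hdz : ¬ digit = 0 := by
          intro h; rw [h] at hleadle; omega
        rw [if_neg hdz]
        rcases lt_or_eq_of_le hleadle with hlt | heq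
        · have hminlt : minimum_value < digit * p := by
            have := (hlead_lt digit).mp hlt
            omega
          rw [if_pos hlt]
          rw [hpdef] at hminlt ⊢
          exact max_eq_left (by omega)
        · have hge : digit * p ≤ minimum_value := by
            rw [← hlead_le]; omega
          rw [if_neg (show ¬ lead < digit by omega), if_pos heq]
          rw [hpdef] at hge
          exact max_eq_right hge
      · -- first iteration fails: digit < lead, second iteration returns
        rw [if_neg hc1]
        have hge : (digit + 1) * p ≤ minimum_value := by
          rw [hpdef]; omega
        have hleadgt : digit < lead := by
          have : digit + 1 ≤ lead := by rw [hlead_le]; omega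
          omega
        rw [pvALoop_step_lt9 digit minimum_value k (L - 1 + 1) h9, hpow2]
        by_cases hdz : digit = 0
        · subst hdz
          rw [if_pos (show (0:Int) = 0 from rfl)]
          rw [if_pos (show minimum_value ≤ ((0:Int) + 1) * (10 * p) - 1 by omega)]
          rw [show (0:Int) * (10 * p) = 0 by ring]
          exact max_eq_right (by omega)
        · have hd1 : 1 ≤ digit := by omega
          have h0d : (0:Int) ≤ digit * (10 * p) := mul_nonneg hd0 (by positivity)
          have h1d : 1 * (10 * p) ≤ digit * (10 * p) :=
            mul_le_mul_of_nonneg_right hd1 (by positivity)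
          rw [if_pos (show minimum_value ≤ (digit + 1) * (10 * p) - 1 by nlinarith)]
          rw [if_neg hdz]
          rw [if_neg (show ¬ lead < digit by omega)]
          rw [if_neg (show ¬ lead = digit by omega)]
          have hbig : minimum_value ≤ digit * (10 * p) := by nlinarith
          rw [max_eq_left hbig]
          ring
    · -- digit ≥ 9: the first iteration always returns
      rw [pvALoop_step_ge9 digit minimum_value (k + 1) (L - 1) h9, hpow2]
      rw [if_pos (show minimum_value ≤ 10 * p - 1 by omega)]
      rw [if_neg (show ¬ digit = 0 by omega)]
      by_cases hlt : lead < digit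
      · rw [if_pos hlt]
        have hminlt : minimum_value < digit * p := by
          rcases (by omega : 10 ≤ digit ∨ digit = 9) with h10d | h9d
          · have h10pd : 10 * p ≤ digit * p := mul_le_mul_of_nonneg_right h10d (le_of_lt hp)
            omega
          · have := (hlead_lt digit).mp hlt
            omega
        rw [hpdef] at hminlt ⊢
        exact max_eq_left (by omega)
      · have heq : lead = digit := by omega
        rw [if_neg hlt, if_pos heq]
        have hge : digit * p ≤ minimum_value := by rw [← hlead_le]; omega
        rw [hpdef] at hge
        exact max_eq_right hge
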